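-- pv_equiv track=rewrite | github.com/PJH222/TIL | Algorithm/programmers/대충 만든 자판.py | solution
-- ===== SOURCE A (Python) =====
-- def solution(keymap, targets):
--     answer = []
--
--     for target in targets:
--         result = 0
--         min = 20000000
--         for i in target:
--             for key in keymap:
--                 if i in key and key.find(i) < min:
--                     min =  key.find(i)
--                 else:
--                     continue
--
--             result += 1 + min
--             min = 20000000
--         if result < 20000001:
--             answer.append(result)
--         else:
--             answer.append(-1)
--
--
--
--
--
--     return answer
-- ===== SOURCE B (Python) =====
-- def solution(keymap, targets):
--     best = {}
--     for key in keymap: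
--         for idx, ch in enumerate(key):
--             prev = best.get(ch)
--             if prev is None:
--                 best[ch] = idx
--             elif idx < prev:
--                 best[ch] = idx
--     answer = []
--     for target in targets:
--         result = sum(1 + best.get(ch, 20000000) for ch in target)
--         answer.append(result if result < 20000001 else -1)
--     return answer
-- ===== Notes on version B (the rewrite author's own statement) =====
-- stated objective: faster
-- what changed: B precomputes a single char->minimal-index dictionary from the keymap strings once and then scores each target with O(1) lookups, replacing A's rescan of the whole keymap (with repeated str.find calls) for every character of every target.
import Mathlib
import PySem

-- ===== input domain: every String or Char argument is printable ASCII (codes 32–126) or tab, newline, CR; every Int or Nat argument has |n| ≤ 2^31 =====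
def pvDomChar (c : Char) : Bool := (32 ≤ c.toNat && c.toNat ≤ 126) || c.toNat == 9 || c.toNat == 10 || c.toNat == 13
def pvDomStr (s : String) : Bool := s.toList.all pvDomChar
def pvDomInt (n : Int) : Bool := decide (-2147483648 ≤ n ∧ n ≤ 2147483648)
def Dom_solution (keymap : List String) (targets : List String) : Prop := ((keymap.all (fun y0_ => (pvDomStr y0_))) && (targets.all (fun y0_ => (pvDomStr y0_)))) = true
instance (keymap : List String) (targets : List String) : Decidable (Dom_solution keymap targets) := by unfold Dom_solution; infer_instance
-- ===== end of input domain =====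

-- ===== PORT A =====
-- B replaces A's per-character scan of the whole keymap by one precomputed
-- char -> min-index dictionary; equivalence is exact (objective: faster).
def solution (keymap : List String) (targets : List String) : List Int :=
  targets.foldl (fun answer target =>
    let rm := target.toList.foldl (fun (p : Int × Int) i =>
      let m := keymap.foldl (fun m key =>
        if PySem.Chars.isIn [i] key.toList && PySem.Chars.find key.toList [i] < m then
          PySem.Chars.find key.toList [i]
        else m) p.2
      (p.1 + (1 + m), 20000000)) (0, 20000000)
    if rm.1 < 20000001 then answer ++ [rm.1] else answer ++ [-1]) []

-- ===== PORT B =====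
-- port of Source B's inner `if prev is None / elif idx < prev` dictionary update
def bestStep (d : PySem.Dict Char Int) (p : Int × Char) : PySem.Dict Char Int :=
  match d.get? p.2 with
  | none => d.insert p.2 p.1
  | some prev => if p.1 < prev then d.insert p.2 p.1 else d

-- first double loop of Source B: char -> minimal index over all keymap strings
def buildBest (keymap : List String) : PySem.Dict Char Int :=
  keymap.foldl (fun d key => (PySem.List.enumerate key.toList 0).foldl bestStep d)
    PySem.Dict.empty

def solution_alt (keymap : List String) (targets : List String) : List Int :=
  let best := buildBest keymap
  targets.foldl (fun answer target =>
    let result := (target.toList.map (fun ch => 1 + best.getD ch 20000000)).sum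
    answer ++ [if result < 20000001 then result else -1]) []

-- ===== PRECONDITION & SPEC =====
def Spec_solution (keymap : List String) (targets : List String) (out : List Int) : Prop := out = solution_alt keymap targets
instance (keymap : List String) (targets : List String) (out : List Int) : Decidable (Spec_solution keymap targets out) := by unfold Spec_solution; infer_instance

-- ===== CLAIM (what is proved, stated in full; the proofs are below) =====
def Claim_equal_solution : Prop := ∀ (keymap : List String) (targets : List String), Dom_solution keymap targets → Spec_solution keymap targets (solution keymap targets)

-- ===== LEMMAS AND PROOFS =====

-- minimum of two optional values (none = "absent")
def omin : Option Int → Option Int → Option Int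
  | o, none => o
  | none, some v => some v
  | some u, some v => some (min u v)

-- minimal position (counted from s) at which c occurs in the char list
def occMin : List Char → Char → Int → Option Int
  | [], _, _ => none
  | x :: xs, c, s => if x = c then omin (some s) (occMin xs c (s + 1)) else occMin xs c (s + 1)

theorem occMin_eq_idxOf (key : List Char) (c : Char) (s : Int) :
    occMin key c s = if c ∈ key then some (s + (key.idxOf c : Int)) else none := by
  induction key generalizing s with
  | nil => simp [occMin]
  | cons x xs ih =>
    by_cases hx : x = c
    · subst hx
      rw [occMin, if_pos rfl, ih]
      by_cases hm : x ∈ xs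
      · rw [if_pos hm, if_pos (List.mem_cons_self), List.idxOf_cons_eq _ rfl]
        simp only [omin]
        congr 1
        omega
      · rw [if_neg hm, if_pos (List.mem_cons_self), List.idxOf_cons_eq _ rfl]
        simp [omin]
    · rw [occMin, if_neg hx, ih]
      by_cases hm : c ∈ xs
      · rw [if_pos hm, if_pos (List.mem_cons_of_mem _ hm), List.idxOf_cons_ne _ hx]
        congr 1
        push_cast
        ring
      · have hnm : c ∉ x :: xs := by simp [hm, Ne.symm hx]
        rw [if_neg hm, if_neg hnm]

theorem idxOf_le_of_getElem? {l : List Char} {c : Char} {n : Nat}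
    (h : l[n]? = some c) : l.idxOf c ≤ n := by
  induction l generalizing n with
  | nil => simp at h
  | cons x xs ih =>
    by_cases hx : x = c
    · rw [List.idxOf_cons_eq _ hx]; omega
    · rw [List.idxOf_cons_ne _ hx]
      cases n with
      | zero => simp at h; exact absurd h hx
      | succ n => simpa using Nat.succ_le_succ (ih (by simpa using h))

theorem singleton_prefix_drop {l : List Char} {c : Char} {n : Nat} :
    [c] <+: l.drop n ↔ l[n]? = some c := by
  rw [← List.head?_drop]
  generalize l.drop n = t
  constructor
  · rintro ⟨u, rfl⟩
    rfl
  · intro h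
    cases t with
    | nil => simp at h
    | cons y ys =>
      simp only [List.head?_cons, Option.some.injEq] at h
      exact ⟨ys, by simp [h]⟩

theorem find_singleton {key : List Char} {c : Char} (h : c ∈ key) :
    PySem.Chars.find key [c] = (key.idxOf c : Int) := by
  have hinf : [c] <:+: key := by
    obtain ⟨s, t, rfl⟩ := List.append_of_mem h
    exact ⟨s, t, by simp⟩
  have h0 : 0 ≤ PySem.Chars.find key [c] := (PySem.Chars.find_nonneg_iff key [c]).2 hinf
  obtain ⟨hpre, hmin⟩ := PySem.Chars.find_spec h0
  have hget : key[(PySem.Chars.find key [c]).toNat]? = some c := singleton_prefix_drop.1 hpre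
  have h1 : key.idxOf c ≤ (PySem.Chars.find key [c]).toNat := idxOf_le_of_getElem? hget
  have h2 : ¬ (key.idxOf c < (PySem.Chars.find key [c]).toNat) := by
    intro hlt
    exact hmin _ hlt (singleton_prefix_drop.2 (by
      simp [List.getElem?_eq_some_iff, List.idxOf_lt_length_of_mem h,
        List.getElem_idxOf (List.idxOf_lt_length_of_mem h)]))
  omega

-- the optional min-find contribution of one keymap string for character c
def contrib (key : List Char) (c : Char) : Option Int :=
  if PySem.Chars.isIn [c] key then some (PySem.Chars.find key [c]) else none

theorem occMin_zero_eq_contrib (key : List Char) (c : Char) :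
    occMin key c 0 = contrib key c := by
  rw [occMin_eq_idxOf, contrib]
  by_cases hm : c ∈ key
  · have : PySem.Chars.isIn [c] key = true := by
      rw [PySem.Chars.isIn_iff_infix]
      obtain ⟨s, t, rfl⟩ := List.append_of_mem hm
      exact ⟨s, t, by simp⟩
    rw [if_pos hm, if_pos this, find_singleton hm]
    simp
  · have : ¬ PySem.Chars.isIn [c] key = true := by
      rw [PySem.Chars.isIn_iff_infix]
      intro hin
      exact hm (hin.mem List.mem_cons_self)
    rw [if_neg hm, if_neg this]

theorem bestStep_get? (d : PySem.Dict Char Int) (s : Int) (x c : Char) :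
    (bestStep d (s, x)).get? c = if x = c then omin (d.get? c) (some s) else d.get? c := by
  by_cases hx : x = c
  · subst hx
    rw [if_pos rfl]
    rcases hd : d.get? x with _ | v
    · simp [bestStep, hd, omin, PySem.Dict.get?_insert_self]
    · simp only [bestStep, hd, omin]
      by_cases hlt : s < v
      · rw [if_pos hlt, PySem.Dict.get?_insert_self]
        congr 1
        omega
      · rw [if_neg hlt, hd]
        congr 1
        omega
  · rw [if_neg hx]
    rcases hd : d.get? x with _ | v
    · simp only [bestStep, hd]
      exact PySem.Dict.get?_insert_of_ne d s (fun h => hx h.symm)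
    · simp only [bestStep, hd]
      by_cases hlt : s < v
      · rw [if_pos hlt]
        exact PySem.Dict.get?_insert_of_ne d s (fun h => hx h.symm)
      · rw [if_neg hlt]

theorem occMin_ge (key : List Char) (c : Char) :
    ∀ s v : Int, occMin key c s = some v → s ≤ v := by
  induction key with
  | nil => intro s v h; simp [occMin] at h
  | cons x xs ih =>
    intro s v h
    rw [occMin] at h
    by_cases hx : x = c
    · rw [if_pos hx] at h
      rcases ho : occMin xs c (s + 1) with _ | u
      · rw [ho] at h
        simp only [omin, Option.some.injEq] at h
        omega
      · rw [ho] at h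
        have := ih _ _ ho
        simp only [omin, Option.some.injEq] at h
        omega
    · rw [if_neg hx] at h
      have := ih _ _ h
      omega

theorem enum_foldl_get? (key : List Char) (c : Char) :
    ∀ (s : Int) (d : PySem.Dict Char Int),
      (((PySem.List.enumerate key s).foldl bestStep d).get? c) = omin (d.get? c) (occMin key c s) := by
  induction key with
  | nil => intro s d; simp [PySem.List.enumerate_nil, occMin, omin]
  | cons x xs ih =>
    intro s d
    rw [PySem.List.enumerate_cons, List.foldl_cons, ih, bestStep_get?, occMin]
    by_cases hx : x = c
    · rw [if_pos hx, if_pos hx]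
      rcases ho : occMin xs c (s + 1) with _ | u
      · rfl
      · have hu : s + 1 ≤ u := occMin_ge xs c _ _ ho
        rcases d.get? c with _ | w
        · simp only [omin, Option.some.injEq]
          try omega
        · simp only [omin, Option.some.injEq]
          try omega
    · rw [if_neg hx, if_neg hx]

-- joint invariant tying A's running minimum to B's dictionary entry
def AInv (m : Int) (o : Option Int) : Prop :=
  m = (match o with | none => 20000000 | some v => min 20000000 v) ∧
    ∀ v, o = some v → 0 ≤ v

theorem key_step_inv (key : String) (c : Char) {m : Int} {o : Option Int} (h : AInv m o) :
    AInv (if PySem.Chars.isIn [c] key.toList && PySem.Chars.find key.toList [c] < m then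
          PySem.Chars.find key.toList [c] else m)
        (omin o (contrib key.toList c)) := by
  obtain ⟨hm, hnn⟩ := h
  rcases hin : PySem.Chars.isIn [c] key.toList with _ | _
  · have hc : contrib key.toList c = none := by rw [contrib, hin]; rfl
    rw [hc]
    simpa [hin] using ⟨hm, hnn⟩
  · have hf : 0 ≤ PySem.Chars.find key.toList [c] :=
      (PySem.Chars.find_nonneg_iff _ _).2 ((PySem.Chars.isIn_iff_infix _ _).1 hin)
    have hc : contrib key.toList c = some (PySem.Chars.find key.toList [c]) := by
      rw [contrib, hin]; rfl
    rw [hc]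
    rcases ho : o with _ | v
    · rw [ho] at hm
      subst hm
      simp only [Bool.true_and, decide_eq_true_eq, omin, AInv]
      refine ⟨?_, ?_⟩
      · simp only [min_def]
        split_ifs <;> omega
      · intro v hv
        injection hv with hv
        omega
    · rw [ho] at hm hnn
      have hv : 0 ≤ v := hnn v rfl
      subst hm
      simp only [Bool.true_and, decide_eq_true_eq, omin, AInv]
      refine ⟨?_, ?_⟩
      · simp only [min_def]
        split_ifs <;> omega
      · intro w hw
        injection hw with hw
        simp only [min_def] at hw
        omega

theorem keymap_foldl_inv (keymap : List String) (c : Char) :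
    ∀ (m : Int) (d : PySem.Dict Char Int), AInv m (d.get? c) →
      AInv (keymap.foldl (fun m key =>
            if PySem.Chars.isIn [c] key.toList && PySem.Chars.find key.toList [c] < m then
              PySem.Chars.find key.toList [c] else m) m)
          ((keymap.foldl (fun d key => (PySem.List.enumerate key.toList 0).foldl bestStep d) d).get? c) := by
  induction keymap with
  | nil => intro m d h; exact h
  | cons key rest ih =>
    intro m d h
    simp only [List.foldl_cons]
    apply ih
    rw [enum_foldl_get?, occMin_zero_eq_contrib]
    exact key_step_inv key c h

-- A's per-character minimum equals 20000000 ⊓ (B's dictionary lookup), which is ≥ 0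
theorem char_min_eq (keymap : List String) (c : Char) :
    (keymap.foldl (fun m key =>
        if PySem.Chars.isIn [c] key.toList && PySem.Chars.find key.toList [c] < m then
          PySem.Chars.find key.toList [c] else m) 20000000)
      = min 20000000 ((buildBest keymap).getD c 20000000) ∧
    0 ≤ (buildBest keymap).getD c 20000000 := by
  have h0 : AInv (20000000 : Int) ((PySem.Dict.empty (κ := Char) (ν := Int)).get? c) := by
    rw [PySem.Dict.get?_empty]
    exact ⟨rfl, by intro v hv; cases hv⟩
  have h := keymap_foldl_inv keymap c 20000000 PySem.Dict.empty h0
  rw [show (keymap.foldl (fun d key => (PySem.List.enumerate key.toList 0).foldl bestStep d)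
      PySem.Dict.empty) = buildBest keymap from rfl] at h
  obtain ⟨hm, hnn⟩ := h
  have hg : (buildBest keymap).getD c 20000000
      = ((buildBest keymap).get? c).getD 20000000 := by
    simp [PySem.Dict.getD]
  rcases ho : (buildBest keymap).get? c with _ | v
  · rw [ho] at hm hg
    rw [Option.getD_none] at hg
    refine ⟨?_, ?_⟩
    · rw [hg]
      simpa using hm
    · rw [hg]
      norm_num
  · rw [ho] at hm hg
    rw [Option.getD_some] at hg
    refine ⟨?_, ?_⟩
    · rw [hg]
      simpa using hm
    · rw [hg]
      exact hnn v ho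

-- A's inner character loop, as r + Σ (1 + min-index)
theorem target_foldl_eq (keymap : List String) (cs : List Char) :
    ∀ (r : Int),
      (cs.foldl (fun (p : Int × Int) i =>
          let m := keymap.foldl (fun m key =>
            if PySem.Chars.isIn [i] key.toList && PySem.Chars.find key.toList [i] < m then
              PySem.Chars.find key.toList [i] else m) p.2
          (p.1 + (1 + m), 20000000)) (r, 20000000))
        = (r + (cs.map (fun c => 1 + min 20000000 ((buildBest keymap).getD c 20000000))).sum, 20000000) := by
  induction cs with
  | nil => intro r; simp
  | cons c cs ih =>
    intro r
    rw [List.foldl_cons, List.map_cons, List.sum_cons]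
    have := (char_min_eq keymap c).1
    simp only []
    rw [this, ih]
    congr 1
    ring

-- the -1 thresholding gives equal answers even when some stored index exceeds 20000000
theorem threshold_eq (v : Char → Int) (cs : List Char) (hnn : ∀ c, 0 ≤ v c) :
    (if (cs.map (fun c => 1 + min 20000000 (v c))).sum < 20000001 then
        (cs.map (fun c => 1 + min 20000000 (v c))).sum else -1)
      = (if (cs.map (fun c => 1 + v c)).sum < 20000001 then
        (cs.map (fun c => 1 + v c)).sum else -1) := by
  by_cases hall : ∀ c ∈ cs, v c ≤ 20000000
  · have : cs.map (fun c => 1 + min 20000000 (v c)) = cs.map (fun c => 1 + v c) :=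
      List.map_congr_left (fun c hc => by rw [min_eq_right (hall c hc)])
    rw [this]
  · rw [not_forall] at hall
    simp only [not_forall, not_le, exists_prop] at hall
    obtain ⟨c, hc, hbig⟩ := hall
    have hA : (20000001 : Int) ≤ (cs.map (fun c => 1 + min 20000000 (v c))).sum := by
      have hterm : (1 + min 20000000 (v c)) ∈ cs.map (fun c => 1 + min 20000000 (v c)) :=
        List.mem_map_of_mem hc
      have := List.single_le_sum (l := cs.map (fun c => 1 + min 20000000 (v c)))
        (fun x hx => by
          obtain ⟨d, _, rfl⟩ := List.mem_map.1 hx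
          have := hnn d
          omega) _ hterm
      have := hnn c
      omega
    have hB : (20000001 : Int) ≤ (cs.map (fun c => 1 + v c)).sum := by
      have hterm : (1 + v c) ∈ cs.map (fun c => 1 + v c) := List.mem_map_of_mem hc
      have := List.single_le_sum (l := cs.map (fun c => 1 + v c))
        (fun x hx => by
          obtain ⟨d, _, rfl⟩ := List.mem_map.1 hx
          have := hnn d
          omega) _ hterm
      omega
    rw [if_neg (by omega), if_neg (by omega)]

-- ===== VERDICT (by name: the statement is the Claim_ definition above) =====
theorem solution_spec : Claim_equal_solution := by
  intro keymap targets
  unfold Spec_solution solution solution_alt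
  induction targets using List.reverseRecOn with
  | nil => intro _; rfl
  | append_singleton ts t ih =>
    intro hdom
    have hdts : Dom_solution keymap ts := by
      unfold Dom_solution at hdom ⊢
      simp only [List.all_append, Bool.and_eq_true] at hdom ⊢
      exact ⟨hdom.1, hdom.2.1⟩
    rw [List.foldl_append, List.foldl_append, List.foldl_cons, List.foldl_nil,
      List.foldl_cons, List.foldl_nil, ← ih hdts]
    have hT := threshold_eq (fun c => (buildBest keymap).getD c 20000000) t.toList
      (fun c => (char_min_eq keymap c).2)
    simp only [] at hT
    rw [target_foldl_eq keymap t.toList 0]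
    simp only [zero_add]
    split
    · next hA =>
      rw [← hT, if_pos hA]
    · next hA =>
      rw [← hT, if_neg hA]
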